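-- pv_equiv track=rewrite | github.com/najikrayem/SLH-DSA | test/test.py | base_2b
-- ===== SOURCE A (Python) =====
-- def base_2b(s, b, out_len):
--     """ Algorithm 3: base_2b (X, b, out_len).
--         Compute the base 2**b representation of X."""
--     i = 0               # in
--     c = 0               # bits
--     t = 0               # total
--     v = []              # baseb
--     m = (1 << b) - 1    # mask
--     for j in range(out_len):
--         while c < b:
--             t = (t << 8) + int(s[i])
--             i += 1
--             c += 8
--         c -= b
--         v += [ (t >> c) & m ]
--     return v
-- ===== SOURCE B (Python) =====
-- def base_2b(s, b, out_len):
--     """Bulk re-implementation: build big-endian prefix integers once, then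
--     extract each base-2**b digit positionally by shift/mask arithmetic."""
--     m = (1 << b) - 1
--     nbytes = (out_len * b + 7) // 8
--     pref = [0]
--     for i in range(nbytes):
--         pref.append((pref[-1] << 8) + int(s[i]))
--     out = []
--     for j in range(1, out_len + 1):
--         need = (j * b + 7) // 8
--         out.append((pref[need] >> (8 * need - j * b)) & m)
--     return out
-- ===== Notes on version B (the rewrite author's own statement) =====
-- stated objective: alternative
-- what changed: Replaces A's incremental bit-buffer state machine (per-digit while loop carrying in-index, bit-count and accumulator) with a bulk pass: build the table of big-endian prefix integers once, then extract every base-2**b digit positionally with closed-form shift/mask arithmetic.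
import Mathlib
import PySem

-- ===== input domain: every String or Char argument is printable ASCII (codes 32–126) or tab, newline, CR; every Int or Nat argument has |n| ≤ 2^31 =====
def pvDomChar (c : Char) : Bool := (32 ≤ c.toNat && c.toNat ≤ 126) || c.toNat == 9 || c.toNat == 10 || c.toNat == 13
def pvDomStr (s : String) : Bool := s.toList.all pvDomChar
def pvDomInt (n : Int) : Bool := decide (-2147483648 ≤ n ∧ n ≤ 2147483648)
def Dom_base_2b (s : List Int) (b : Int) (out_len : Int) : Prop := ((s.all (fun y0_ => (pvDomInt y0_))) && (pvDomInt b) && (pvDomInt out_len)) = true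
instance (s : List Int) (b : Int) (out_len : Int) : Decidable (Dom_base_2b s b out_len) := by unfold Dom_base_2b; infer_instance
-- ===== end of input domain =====

-- B replaces A's incremental bit-buffer loop by a bulk pass: build prefix big-integers
-- once, then extract every digit positionally by closed-form shift/mask arithmetic
-- (objective: alternative decomposition, same cost).

-- ===== PORT A =====
-- the inner `while c < b:` loop of A
def base2bInner (s : List Int) (b : Int) (i c t : Int) : Int × Int × Int :=
  if c < b then
    base2bInner s b (i + 1) (c + 8) ((t <<< (8 : Nat)) + PySem.List.pyGetD s i 0)
  else (i, c, t)
termination_by (b - c).toNat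
decreasing_by omega

def base_2b (s : List Int) (b : Int) (out_len : Int) : List Int :=
  let m := ((1 : Int) <<< b.toNat) - 1
  ((PySem.List.pyRange 0 out_len 1).foldl
    (fun (st : Int × Int × Int × List Int) _j =>
      match base2bInner s b st.1 st.2.1 st.2.2.1 with
      | (i', c', t') =>
        (i', c' - b, t', st.2.2.2 ++ [PySem.Int.band (t' >>> (c' - b).toNat) m]))
    (0, 0, 0, [])).2.2.2

-- ===== PORT B =====
def base_2b_alt (s : List Int) (b : Int) (out_len : Int) : List Int :=
  let m := ((1 : Int) <<< b.toNat) - 1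
  let nbytes := PySem.Int.floordiv (out_len * b + 7) 8
  let pref := (PySem.List.pyRange 0 nbytes 1).foldl
    (fun (p : List Int) i =>
      p ++ [(PySem.List.pyGetD p (-1) 0 <<< (8 : Nat)) + PySem.List.pyGetD s i 0]) [0]
  (PySem.List.pyRange 1 (out_len + 1) 1).map (fun j =>
    let need := PySem.Int.floordiv (j * b + 7) 8
    PySem.Int.band (PySem.List.pyGetD pref need 0 >>> (8 * need - j * b).toNat) m)

-- ===== PRECONDITION & SPEC =====
-- Pre_ excludes exactly the inputs where Python A raises: b < 0 (ValueError on 1 << b)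
-- and byte strings shorter than the ceil(out_len*b/8) bytes A consumes (IndexError).
def Pre_base_2b (s : List Int) (b : Int) (out_len : Int) : Prop :=
  0 ≤ b ∧ PySem.Int.floordiv (out_len * b + 7) 8 ≤ (s.length : Int)
instance (s : List Int) (b : Int) (out_len : Int) : Decidable (Pre_base_2b s b out_len) := by
  unfold Pre_base_2b; infer_instance

def pvWitness_base_2b : List Int × Int × Int := ([3, 200], 4, 4)

def Spec_base_2b (s : List Int) (b : Int) (out_len : Int) (out : List Int) : Prop :=
  out = base_2b_alt s b out_len
instance (s : List Int) (b : Int) (out_len : Int) (out : List Int) : Decidable (Spec_base_2b s b out_len out) := by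
  unfold Spec_base_2b; infer_instance

-- ===== CLAIM (what is proved, stated in full; the proofs are below) =====
def Claim_equal_base_2b : Prop := ∀ (s : List Int) (b : Int) (out_len : Int),
  Dom_base_2b s b out_len → Pre_base_2b s b out_len →
  Spec_base_2b s b out_len (base_2b s b out_len)

-- ===== LEMMAS AND PROOFS =====

-- prefix big-integer of the first k bytes of s (missing bytes read as 0, like pyGetD)
def prefFn (s : List Int) : Nat → Int
  | 0 => 0
  | k + 1 => (prefFn s k <<< (8 : Nat)) + PySem.List.pyGetD s (k : Int) 0

-- characterization of A's inner while loop
lemma inner_spec (s : List Int) (b : Int) :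
    ∀ (n : Nat) (i c : Int), (b - c).toNat ≤ 8 * n → 0 ≤ i →
    ∃ k : Nat, base2bInner s b i c (prefFn s i.toNat) =
        (i + k, c + 8 * k, prefFn s (i.toNat + k)) ∧
      b ≤ c + 8 * k ∧ (c + 8 * k < b + 8 ∨ k = 0) ∧ (k = 0 → b ≤ c) := by
  intro n
  induction n with
  | zero =>
    intro i c hn hi
    refine ⟨0, ?_, by omega, Or.inr rfl, fun _ => by omega⟩
    rw [base2bInner]
    simp only [if_neg (by omega : ¬ c < b)]
    simp
  | succ n ih =>
    intro i c hn hi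
    by_cases h : c < b
    · have hstep : (prefFn s i.toNat <<< (8 : Nat)) + PySem.List.pyGetD s i 0
          = prefFn s ((i + 1).toNat) := by
        have h1 : (i + 1).toNat = i.toNat + 1 := by omega
        rw [h1, prefFn]
        congr 2
        omega
      obtain ⟨k, hk, h1, h2, h3⟩ := ih (i + 1) (c + 8) (by omega) (by omega)
      refine ⟨k + 1, ?_, by omega, ?_, by omega⟩
      · rw [base2bInner, if_pos h, hstep, hk]
        simp only [Prod.mk.injEq]
        refine ⟨by push_cast; ring, by push_cast; ring, by congr 1; omega⟩
      · rcases h2 with h2 | h2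
        · left; push_cast at h2 ⊢; omega
        · left; subst h2; push_cast; omega
    · refine ⟨0, ?_, by omega, Or.inr rfl, fun _ => by omega⟩
      rw [base2bInner, if_neg h]
      simp

-- B's prefix list equals the table of prefFn values
lemma pref_build (s : List Int) :
    ∀ n : Nat,
      ((PySem.List.pyRange 0 (n : Int) 1).foldl
        (fun (p : List Int) i =>
          p ++ [(PySem.List.pyGetD p (-1) 0 <<< (8 : Nat)) + PySem.List.pyGetD s i 0]) [0])
      = (List.range (n + 1)).map (prefFn s) := by
  intro n
  induction n with
  | zero => simp [List.range_succ, prefFn]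
  | succ n ih =>
    have hsplit : PySem.List.pyRange 0 ((n : Int) + 1) 1
        = PySem.List.pyRange 0 (n : Int) 1 ++ [(n : Int)] :=
      PySem.List.pyRange_one_succ_right (by omega)
    push_cast
    rw [hsplit, List.foldl_append, ih]
    have hlast : (List.range (n + 1)).map (prefFn s)
        = (List.range n).map (prefFn s) ++ [prefFn s n] := by
      rw [List.range_succ]; simp
    simp only [List.foldl_cons, List.foldl_nil, hlast,
      PySem.List.pyGetD_neg_one_append_singleton]
    rw [List.range_succ, List.range_succ]
    simp [prefFn]

-- lookup in the prefix table
lemma pref_lookup (s : List Int) (n : Nat) (q : Int) (h0 : 0 ≤ q) (h1 : q ≤ (n : Int)) :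
    PySem.List.pyGetD ((List.range (n + 1)).map (prefFn s)) q 0 = prefFn s q.toNat := by
  have hlt : q < (((List.range (n + 1)).map (prefFn s)).length : Int) := by
    simp; omega
  rw [PySem.List.pyGetD_eq_getElem _ 0 h0 hlt]
  simp

lemma ediv8_eq (X c i : Int) (hc0 : 0 ≤ c) (hc7 : c ≤ 7) (h : 8 * i = X + c) :
    (X + 7) / 8 = i := by omega

-- A's outer loop invariant, stated over a Nat-counted prefix of the range
lemma outer_spec (s : List Int) (b out_len : Int) (hb : 0 ≤ b)
    (m : Int) :
    ∀ j : Nat, (j : Int) ≤ out_len →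
    ∃ i c : Int, 0 ≤ i ∧ 0 ≤ c ∧ c ≤ 7 ∧ 8 * i = (j : Int) * b + c ∧
      ((PySem.List.pyRange 0 (j : Int) 1).foldl
        (fun (st : Int × Int × Int × List Int) _j =>
          ((base2bInner s b st.1 st.2.1 st.2.2.1).1,
           (base2bInner s b st.1 st.2.1 st.2.2.1).2.1 - b,
           (base2bInner s b st.1 st.2.1 st.2.2.1).2.2,
           st.2.2.2 ++ [PySem.Int.band
             ((base2bInner s b st.1 st.2.1 st.2.2.1).2.2 >>>
               ((base2bInner s b st.1 st.2.1 st.2.2.1).2.1 - b).toNat) m]))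
        (0, 0, 0, []))
      = (i, c, prefFn s i.toNat,
          (PySem.List.pyRange 1 ((j : Int) + 1) 1).map (fun jj =>
            PySem.Int.band
              (prefFn s (PySem.Int.floordiv (jj * b + 7) 8).toNat >>>
                (8 * PySem.Int.floordiv (jj * b + 7) 8 - jj * b).toNat) m)) := by
  intro j
  induction j with
  | zero =>
    intro _
    exact ⟨0, 0, le_refl 0, le_refl 0, by omega, by omega, by
      simp [PySem.List.pyRange_one_eq_nil, prefFn]⟩
  | succ j ih =>
    intro hj
    obtain ⟨i, c, hi0, hc0, hc7, hrel, hfold⟩ := ih (by push_cast at hj ⊢; omega)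
    obtain ⟨k, hk, hbk, hk8, _⟩ :=
      inner_spec s b ((b - c).toNat) i c (by omega) hi0
    have hsplit : PySem.List.pyRange 0 ((j : Int) + 1) 1
        = PySem.List.pyRange 0 (j : Int) 1 ++ [(j : Int)] :=
      PySem.List.pyRange_one_succ_right (by omega)
    have hc'8 : c + 8 * k < b + 8 := by
      rcases hk8 with h | h
      · exact h
      · omega
    refine ⟨i + k, c + 8 * k - b, by omega, by omega, by omega,
      by push_cast; linarith [hrel], ?_⟩
    push_cast
    rw [hsplit, List.foldl_append, hfold]
    have hneed : PySem.Int.floordiv (((j : Int) + 1) * b + 7) 8 = i + k := by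
      rw [PySem.Int.floordiv_eq_ediv_of_pos (by norm_num)]
      refine ediv8_eq _ (c + 8 * k - b) (i + (k : Int)) (by omega) (by omega) ?_
      linarith [hrel]
    have hmap : PySem.List.pyRange 1 ((j : Int) + 1 + 1) 1
        = PySem.List.pyRange 1 ((j : Int) + 1) 1 ++ [(j : Int) + 1] :=
      PySem.List.pyRange_one_succ_right (by omega)
    rw [hmap]
    have htn : (i + (k : Int)).toNat = i.toNat + k := by omega
    have hdig : (8 * (i + (k : Int)) - ((j : Int) + 1) * b).toNat
        = (c + 8 * (k : Int) - b).toNat := by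
      have h8 : 8 * (i + (k : Int)) - ((j : Int) + 1) * b = c + 8 * (k : Int) - b := by
        linarith [hrel]
      rw [h8]
    simp only [List.foldl_cons, List.foldl_nil, hk,
      List.map_append, List.map_cons, List.map_nil, hneed, htn, hdig]

-- final assembly
lemma base_2b_eq (s : List Int) (b out_len : Int) (hb : 0 ≤ b) :
    base_2b s b out_len = base_2b_alt s b out_len := by
  unfold base_2b base_2b_alt
  dsimp only
  by_cases hout : out_len ≤ 0
  · rw [PySem.List.pyRange_one_eq_nil hout,
      PySem.List.pyRange_one_eq_nil (show out_len + 1 ≤ (1 : Int) by omega)]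
    simp
  · rw [not_le] at hout
    have hN : ((out_len.toNat : Int)) = out_len := by omega
    obtain ⟨i, c, hi0, hc0, hc7, hrel, hfold⟩ :=
      outer_spec s b out_len hb (((1 : Int) <<< b.toNat) - 1) out_len.toNat (by omega)
    rw [hN] at hfold
    rw [hfold]
    -- rewrite B's prefix list and its lookups
    have hnb0 : 0 ≤ PySem.Int.floordiv (out_len * b + 7) 8 := by
      rw [PySem.Int.floordiv_eq_ediv_of_pos (by norm_num)]
      have : 0 ≤ out_len * b := mul_nonneg (by omega) hb
      omega
    have hNb : ((PySem.Int.floordiv (out_len * b + 7) 8).toNat : Int)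
        = PySem.Int.floordiv (out_len * b + 7) 8 := by omega
    rw [← hNb, pref_build s]
    apply List.map_congr_left
    intro jj hjj
    rw [PySem.List.mem_pyRange_one] at hjj
    have hneed0 : 0 ≤ PySem.Int.floordiv (jj * b + 7) 8 := by
      rw [PySem.Int.floordiv_eq_ediv_of_pos (by norm_num)]
      have : 0 ≤ jj * b := mul_nonneg (by omega) hb
      omega
    have hmono : PySem.Int.floordiv (jj * b + 7) 8
        ≤ PySem.Int.floordiv (out_len * b + 7) 8 := by
      rw [PySem.Int.floordiv_eq_ediv_of_pos (by norm_num),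
        PySem.Int.floordiv_eq_ediv_of_pos (by norm_num)]
      have : jj * b ≤ out_len * b := mul_le_mul_of_nonneg_right (by omega) hb
      omega
    rw [pref_lookup s _ _ hneed0 (by omega)]

-- ===== VERDICT (by name: the statement is the Claim_ definition above) =====
theorem base_2b_spec : Claim_equal_base_2b := by
  intro s b out_len _hdom hpre
  unfold Spec_base_2b
  exact base_2b_eq s b out_len hpre.1
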